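-- pv_equiv track=rewrite | github.com/PrashikshitSaini/crypto-ciphers | Assign2/Saini2.py | fill_table
-- ===== SOURCE A (Python) =====
-- def fill_table(data, rows, cols):
--     table = []
--     for i in range(0, len(data), cols):
--         row = list(data[i:i + cols])
--         while len(row) < cols:
--             row.append(' ')
--         table.append(row)
--     while len(table) < rows:
--         table.append([' '] * cols)
--     return table
-- ===== SOURCE B (Python) =====
-- def fill_table(data, rows, cols):
--     n_rows = max(rows, -(-len(data) // cols) if cols > 0 else 0)
--     return [[data[r * cols + c] if r * cols + c < len(data) else ' ' for c in range(cols)]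
--             for r in range(n_rows)]
-- ===== Notes on version B (the rewrite author's own statement) =====
-- stated objective: alternative
-- what changed: A slices the data into rows and pads with two while-loops (pad each short row, then append blank rows); B computes the needed row count by ceiling division and builds the table cell by cell, each cell (r,c) read directly from data[r*cols+c] or ' ' when that index is past the end.
import Mathlib
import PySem

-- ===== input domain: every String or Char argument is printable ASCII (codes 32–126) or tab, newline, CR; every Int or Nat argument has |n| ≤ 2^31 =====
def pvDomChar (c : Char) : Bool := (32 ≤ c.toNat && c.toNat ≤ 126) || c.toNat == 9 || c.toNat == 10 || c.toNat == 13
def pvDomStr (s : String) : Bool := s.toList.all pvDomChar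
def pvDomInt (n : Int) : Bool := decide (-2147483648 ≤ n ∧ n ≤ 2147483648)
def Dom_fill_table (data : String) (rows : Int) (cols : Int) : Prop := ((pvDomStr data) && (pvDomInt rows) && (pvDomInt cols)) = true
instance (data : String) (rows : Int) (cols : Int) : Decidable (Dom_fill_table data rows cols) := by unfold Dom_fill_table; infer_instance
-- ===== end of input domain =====

-- B replaces A's slice-and-pad loops by a per-cell coordinate construction: cell (r,c) is
-- data[r*cols+c] when that index exists, else ' ' (objective: alternative, same cost).

-- shared type-convention helper: a Python 1-character string (an element of list(s) / s[i])
def pvChr (c : Char) : String := String.ofList [c]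

-- ===== PORT A =====
-- while len(row) < cols: row.append(' ')
def pvPadRowA (cols : Int) (row : List String) : List String :=
  if row.length < cols then pvPadRowA cols (row ++ [" "]) else row
termination_by (cols - row.length).toNat
decreasing_by simp; omega

-- while len(table) < rows: table.append([' '] * cols)
def pvPadTableA (rows cols : Int) (table : List (List String)) : List (List String) :=
  if table.length < rows then pvPadTableA rows cols (table ++ [PySem.List.pyRepeat [" "] cols]) else table
termination_by (rows - table.length).toNat
decreasing_by simp; omega

def fill_table (data : String) (rows : Int) (cols : Int) : List (List String) :=
  let table := (PySem.List.pyRange 0 (PySem.Str.len data) cols).foldl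
    (fun table i =>
      let row := (PySem.Str.slice data (some i) (some (i + cols))).toList.map pvChr
      table ++ [pvPadRowA cols row]) []
  pvPadTableA rows cols table

-- ===== PORT B =====
def fill_table_alt (data : String) (rows : Int) (cols : Int) : List (List String) :=
  (PySem.List.pyRange 0 (max rows (if 0 < cols then -(PySem.Int.floordiv (-(PySem.Str.len data)) cols) else 0)) 1).map (fun r =>
    (PySem.List.pyRange 0 cols 1).map (fun c =>
      if r * cols + c < PySem.Str.len data then pvChr ((PySem.Str.pyGet? data (r * cols + c)).getD ' ') else " "))

-- ===== PRECONDITION & SPEC =====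
-- Pre_ excludes only cols = 0, where Python's range(0, len(data), 0) makes A raise ValueError.
def Pre_fill_table (data : String) (rows : Int) (cols : Int) : Prop := cols ≠ 0
instance (data : String) (rows : Int) (cols : Int) : Decidable (Pre_fill_table data rows cols) := by unfold Pre_fill_table; infer_instance
def pvWitness_fill_table : String × Int × Int := ("HELLO", 3, 2)

def Spec_fill_table (data : String) (rows : Int) (cols : Int) (out : List (List String)) : Prop := out = fill_table_alt data rows cols
instance (data : String) (rows : Int) (cols : Int) (out : List (List String)) : Decidable (Spec_fill_table data rows cols out) := by unfold Spec_fill_table; infer_instance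

-- ===== CLAIM (what is proved, stated in full; the proofs are below) =====
def Claim_equal_fill_table : Prop := ∀ (data : String) (rows : Int) (cols : Int), Dom_fill_table data rows cols → Pre_fill_table data rows cols → Spec_fill_table data rows cols (fill_table data rows cols)

-- ===== LEMMAS AND PROOFS =====

-- closed form of A's inner while loop
theorem pvPadRowA_eq (cols : Int) (row : List String) :
    pvPadRowA cols row = row ++ List.replicate (cols - row.length).toNat " " := by
  fun_induction pvPadRowA cols row with
  | case1 row h ih =>
      rw [ih, List.append_assoc]
      congr 1
      have h2 : (cols - (row.length : Int)).toNat = (cols - ((row ++ [" "]).length : Int)).toNat + 1 := by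
        simp; omega
      rw [h2, List.replicate_succ]
      rfl
  | case2 row h =>
      have h0 : (cols - (row.length : Int)).toNat = 0 := by omega
      simp [h0]

-- closed form of A's outer while loop
theorem pvPadTableA_eq (rows cols : Int) (table : List (List String)) :
    pvPadTableA rows cols table =
      table ++ List.replicate (rows - table.length).toNat (PySem.List.pyRepeat [" "] cols) := by
  fun_induction pvPadTableA rows cols table with
  | case1 table h ih =>
      rw [ih, List.append_assoc]
      congr 1
      have h2 : (rows - (table.length : Int)).toNat
           = (rows - ((table ++ [PySem.List.pyRepeat [" "] cols]).length : Int)).toNat + 1 := by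
        simp; omega
      rw [h2, List.replicate_succ]
      rfl
  | case2 table h =>
      have h0 : (rows - (table.length : Int)).toNat = 0 := by omega
      simp [h0]

-- A's main loop (append-accumulation) is a map
theorem pvFoldlAppend {a b : Type} (f : a -> b) (l : List a) (acc : List b) :
    l.foldl (fun t i => t ++ [f i]) acc = acc ++ l.map f := by
  induction l generalizing acc with
  | nil => simp
  | cons x xs ih => simp [List.foldl_cons, ih]

-- the ceiling bracket for the K produced by pyRange_of_pos
theorem pvCeilBracket (n cols : Int) (hc : 0 < cols) (hn : 0 ≤ n) :
    (((if 0 < n then ((n + cols - 1) / cols).toNat else 0 : Nat) : Int) - 1) * cols < n ∧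
    n ≤ ((if 0 < n then ((n + cols - 1) / cols).toNat else 0 : Nat) : Int) * cols := by
  split_ifs with h
  · set q : Int := (n + cols - 1) / cols with hq
    have hm := Int.mul_ediv_add_emod (n + cols - 1) cols
    have h0 : 0 ≤ (n + cols - 1) % cols := Int.emod_nonneg _ (by omega)
    have h1 : (n + cols - 1) % cols < cols := Int.emod_lt_of_pos _ hc
    have hq0 : 0 ≤ q := Int.ediv_nonneg (by omega) (by omega)
    rw [Int.toNat_of_nonneg hq0]
    constructor <;> nlinarith
  · have hn0 : n = 0 := by omega
    subst hn0
    push_cast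
    constructor <;> nlinarith

-- a B row whose first index is past the data is all blanks
theorem pvRowB_blank (data : String) (cols r : Int) (h : PySem.Str.len data ≤ r * cols) :
    (PySem.List.pyRange 0 cols 1).map (fun c =>
        if r * cols + c < PySem.Str.len data then pvChr ((PySem.Str.pyGet? data (r * cols + c)).getD ' ') else " ")
      = List.replicate cols.toNat " " := by
  rw [PySem.List.pyRange_one, List.map_map]
  have h1 : ∀ j ∈ List.range (cols - 0).toNat,
      ((fun c => if r * cols + c < PySem.Str.len data then pvChr ((PySem.Str.pyGet? data (r * cols + c)).getD ' ') else " ")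
        ∘ (fun k : Nat => (0:Int) + (k:Int))) j = " " := by
    intro j hj
    have hcond : ¬ (r * cols + ((0:Int) + (j:Int)) < PySem.Str.len data) := by
      have h2 : (0:Int) ≤ (j:Int) := by positivity
      omega
    simp only [Function.comp_apply, if_neg hcond]
  rw [List.map_congr_left h1, List.map_const', List.length_range]
  congr 1
  omega

-- a B row that starts inside the data is A's padded chunk
theorem pvRowB_chunk (data : String) (cols : Int) (r : Int) (hc : 0 < cols) (hr0 : 0 ≤ r)
    (hrn : r * cols < PySem.Str.len data) :
    pvPadRowA cols ((PySem.Str.slice data (some (r * cols)) (some (r * cols + cols))).toList.map pvChr)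
      = (PySem.List.pyRange 0 cols 1).map (fun c =>
          if r * cols + c < PySem.Str.len data then pvChr ((PySem.Str.pyGet? data (r * cols + c)).getD ' ') else " ") := by
  have hlen : PySem.Str.len data = (data.toList.length : Int) := by simp [PySem.Str.len_eq]
  have hi0 : (0:Int) ≤ r * cols := by positivity
  rw [PySem.Str.toList_slice, PySem.Chars.slice_eq_listSlice,
      PySem.List.slice_toNat data.toList hi0 (by omega), pvPadRowA_eq]
  set i : Nat := (r * cols).toNat with hidef
  have hw : (r * cols + cols).toNat - i = cols.toNat := by omega
  rw [hw]
  rw [PySem.List.pyRange_one, List.map_map]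
  have hiN : i < data.toList.length := by omega
  have hcs : ((data.toList.drop i).take cols.toNat).length = min cols.toNat (data.toList.length - i) := by
    simp
  apply List.ext_getElem
  · simp only [List.length_append, List.length_map, List.length_range, List.length_replicate, hcs]
    omega
  · intro j hj1 hj2
    simp only [List.length_map, List.length_range] at hj2
    have hjc : j < cols.toNat := by omega
    have hidx : r * cols + ((0:Int) + (j:Int)) = ((i + j : Nat) : Int) := by push_cast; omega
    simp only [List.getElem_map, List.getElem_range, Function.comp_apply]
    rw [hidx, PySem.Str.pyGet?_natCast]
    by_cases hin : i + j < data.toList.length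
    · have hl : j < (((data.toList.drop i).take cols.toNat).map pvChr).length := by
        simp only [List.length_map, hcs]; omega
      rw [List.getElem_append_left hl]
      have hcond : (((i + j : Nat) : Int) < PySem.Str.len data) := by
        rw [hlen]; exact_mod_cast hin
      rw [if_pos hcond]
      simp [List.getElem_take, List.getElem_drop, List.getElem?_eq_getElem hin]
    · have hl : ¬ j < (((data.toList.drop i).take cols.toNat).map pvChr).length := by
        simp only [List.length_map, hcs]; omega
      rw [List.getElem_append_right (by simp only [List.length_map, hcs]; omega)]
      have hcond : ¬ (((i + j : Nat) : Int) < PySem.Str.len data) := by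
        rw [hlen]; exact_mod_cast hin
      rw [if_neg hcond]
      simp

-- ===== VERDICT (by name: the statement is the Claim_ definition above) =====
theorem fill_table_spec : Claim_equal_fill_table := by
  intro data rows cols _ hpre
  unfold Spec_fill_table fill_table fill_table_alt
  have hn : (0:Int) ≤ PySem.Str.len data := by simp [PySem.Str.len_eq]
  rcases lt_or_gt_of_ne hpre with hneg | hpos
  · -- cols < 0 : A's chunk loop is empty, B's rows are all empty
    have hr : PySem.List.pyRange 0 (PySem.Str.len data) cols = [] := by
      rw [PySem.List.pyRange_of_neg _ _ hneg]
      have h0 : ¬ (PySem.Str.len data < 0) := by omega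
      simp only [h0, if_false, List.range_zero, List.map_nil]
    rw [hr]
    have hcneg : ¬ (0 < cols) := by omega
    have hrows : (PySem.List.pyRange 0 cols 1) = ([] : List Int) := by
      have h0 : (cols - 0).toNat = 0 := by omega
      rw [PySem.List.pyRange_one, h0]
      simp
    have hrep : PySem.List.pyRepeat [" "] cols = ([] : List String) := by
      have h0 : cols.toNat = 0 := by omega
      rw [PySem.List.pyRepeat_singleton, h0]
      simp
    simp only [List.foldl_nil, pvPadTableA_eq, List.nil_append, if_neg hcneg, hrows,
      List.map_nil, PySem.List.pyRange_one, List.map_map, hrep, List.length_nil,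
      Nat.cast_zero, Int.sub_zero]
    simp only [Function.comp_def]
    rw [List.map_const', List.length_range]
    congr 1
    omega
  · -- 0 < cols
    have hrep := PySem.List.pyRange_of_pos 0 (PySem.Str.len data) hpos
    set K : Nat := (if 0 < PySem.Str.len data then ((PySem.Str.len data - 0 + cols - 1) / cols).toNat else 0) with hK
    have hKeq : K = (if 0 < PySem.Str.len data then ((PySem.Str.len data + cols - 1) / cols).toNat else 0) := by
      have h0 : PySem.Str.len data - 0 = PySem.Str.len data := by omega
      rw [hK, h0]
    have hbr := pvCeilBracket (PySem.Str.len data) cols hpos hn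
    rw [← hKeq] at hbr
    -- B's computed row count equals K
    have hceil : (if 0 < cols then -(PySem.Int.floordiv (-(PySem.Str.len data)) cols) else 0) = (K : Int) := by
      rw [if_pos hpos]
      exact (PySem.Int.neg_floordiv_neg_eq_iff_of_pos hpos).mpr ⟨hbr.1, hbr.2⟩
    -- A as map ++ replicate
    rw [pvFoldlAppend
          (fun i => pvPadRowA cols ((PySem.Str.slice data (some i) (some (i + cols))).toList.map pvChr))
          _ [], List.nil_append, pvPadTableA_eq]
    have hApy : PySem.List.pyRange 0 (PySem.Str.len data) cols
        = (List.range K).map (fun k : Nat => (0:Int) + cols * (k:Int)) := by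
      rw [hrep]
    rw [hApy, List.map_map, List.length_map, List.length_range]
    -- B as a split range
    rw [hceil, PySem.List.pyRange_one 0 (max rows (K:Int)), List.map_map]
    set M : Nat := (max rows (K:Int) - 0).toNat with hM
    have hKM : K ≤ M := by
      rcases le_total rows (K:Int) with h | h
      · simp only [hM, max_eq_right h]; omega
      · simp only [hM, max_eq_left h]; omega
    have hMsplit : M = K + (M - K) := by omega
    rw [hMsplit, List.range_add, List.map_append, List.map_map]
    congr 1
    · -- the first K rows
      apply List.map_congr_left
      intro k hk
      have hkK : k < K := List.mem_range.mp hk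
      have hkn : ((0:Int) + (k:Int)) * cols < PySem.Str.len data := by
        have h1 : (k:Int) ≤ (K:Int) - 1 := by omega
        have h2 : (k:Int) * cols ≤ ((K:Int) - 1) * cols :=
          mul_le_mul_of_nonneg_right h1 hpos.le
        have h3 : ((0:Int) + (k:Int)) * cols = (k:Int) * cols := by ring
        omega
      simp only [Function.comp_apply]
      have harg1 : (0:Int) + cols * (k:Int) = ((0:Int) + (k:Int)) * cols := by ring
      rw [harg1]
      exact pvRowB_chunk data cols ((0:Int) + (k:Int)) hpos (by positivity) hkn
    · -- the blank tail rows
      have hblank : ∀ j ∈ List.range (M - K),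
          (((fun r => (PySem.List.pyRange 0 cols 1).map (fun c =>
              if r * cols + c < PySem.Str.len data then pvChr ((PySem.Str.pyGet? data (r * cols + c)).getD ' ') else " "))
            ∘ (fun k : Nat => (0:Int) + (k:Int))) ∘ (fun x : Nat => K + x)) j
          = List.replicate cols.toNat " " := by
        intro j hj
        simp only [Function.comp_apply]
        apply pvRowB_blank
        have h1 : (K:Int) ≤ (0:Int) + ((K + j : Nat) : Int) := by push_cast; omega
        have h2 : (K:Int) * cols ≤ ((0:Int) + ((K + j : Nat) : Int)) * cols :=
          mul_le_mul_of_nonneg_right h1 hpos.le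
        omega
      rw [List.map_congr_left hblank, List.map_const', List.length_range,
          PySem.List.pyRepeat_singleton]
      congr 1
      rcases le_total rows (K:Int) with h | h
      · simp only [hM, max_eq_right h]; omega
      · simp only [hM, max_eq_left h]; omega
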